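-- pv_equiv track=rewrite | github.com/adamstefanik/affine_cipher | affine_cipher.py | filter_input
-- ===== SOURCE A (Python) =====
-- import unicodedata
--
-- DEFAULT_ALPHABET = "ABCDEFGHIJKLMNOPQRSTUVWXYZ0123456789"
--
-- SPACE_MARKER = "XMEZERAX"
--
-- def remove_diacritics(text):
--     nfkd = unicodedata.normalize("NFKD", text)
--     return "".join([c for c in nfkd if not unicodedata.combining(c)])
--
-- def filter_input(text, alphabet=DEFAULT_ALPHABET):
--     text = remove_diacritics(text)
--     result = ""
--     for c in text.upper():
--         if c == " ":
--             result += SPACE_MARKER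
--         elif c in alphabet:
--             result += c
--     return result
-- ===== SOURCE B (Python) =====
-- import unicodedata
--
-- DEFAULT_ALPHABET = "ABCDEFGHIJKLMNOPQRSTUVWXYZ0123456789"
--
-- SPACE_MARKER = "XMEZERAX"
--
-- def remove_diacritics(text):
--     nfkd = unicodedata.normalize("NFKD", text)
--     return "".join([c for c in nfkd if not unicodedata.combining(c)])
--
-- def filter_input(text, alphabet=DEFAULT_ALPHABET):
--     text = remove_diacritics(text).upper()
--     return SPACE_MARKER.join(
--         ''.join(c for c in seg if c in alphabet)
--         for seg in text.split(' '))
-- ===== Notes on version B (the rewrite author's own statement) =====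
-- stated objective: simpler
-- what changed: Replaces the per-character accumulator loop with a space/alphabet branch by a tokenise-filter-join shape: split on the literal space (keeping empty segments), filter each segment to the alphabet, join with SPACE_MARKER.
import Mathlib
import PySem

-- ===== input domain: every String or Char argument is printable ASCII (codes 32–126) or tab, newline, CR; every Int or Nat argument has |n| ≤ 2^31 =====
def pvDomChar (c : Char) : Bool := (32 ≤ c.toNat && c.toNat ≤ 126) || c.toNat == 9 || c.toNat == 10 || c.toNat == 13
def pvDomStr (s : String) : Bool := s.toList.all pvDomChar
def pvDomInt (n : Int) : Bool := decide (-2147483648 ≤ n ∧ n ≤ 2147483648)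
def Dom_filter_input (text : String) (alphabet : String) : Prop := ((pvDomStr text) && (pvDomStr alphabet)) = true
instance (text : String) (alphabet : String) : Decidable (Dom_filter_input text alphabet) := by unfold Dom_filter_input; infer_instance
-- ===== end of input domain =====

-- B replaces A's per-character space/alphabet branch loop by split-on-space, filter each segment, join with the marker (objective: simpler decomposition).

-- SPACE_MARKER = "XMEZERAX"
def pvSpaceMarker : List Char := ['X', 'M', 'E', 'Z', 'E', 'R', 'A', 'X']

-- remove_diacritics: NFKD normalisation is the identity on the printable-ASCII/tab/newline/CR
-- domain and no such character is combining, so on Dom it returns its argument unchanged;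
-- ported as the identity (exact on the stated domain).
def remove_diacritics (text : String) : String := text

-- ===== PORT A =====
def filter_input (text : String) (alphabet : String) : String :=
  let t := remove_diacritics text
  String.mk ((PySem.Chars.upper t.toList).foldl
    (fun result c =>
      if c = ' ' then result ++ pvSpaceMarker
      else if PySem.Chars.isIn [c] alphabet.toList then result ++ [c]
      else result) [])

-- ===== PORT B =====
def filter_input_alt (text : String) (alphabet : String) : String :=
  let t := PySem.Chars.upper (remove_diacritics text).toList
  String.mk (PySem.Chars.join pvSpaceMarker
    ((PySem.Chars.splitOn t [' ']).map
      (fun seg => seg.filter (fun c => PySem.Chars.isIn [c] alphabet.toList))))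

-- ===== PRECONDITION & SPEC =====
def Spec_filter_input (text : String) (alphabet : String) (out : String) : Prop := out = filter_input_alt text alphabet
instance (text : String) (alphabet : String) (out : String) : Decidable (Spec_filter_input text alphabet out) := by unfold Spec_filter_input; infer_instance

-- ===== CLAIM (what is proved, stated in full; the proofs are below) =====
def Claim_equal_filter_input : Prop := ∀ (text : String) (alphabet : String), Dom_filter_input text alphabet → Spec_filter_input text alphabet (filter_input text alphabet)

-- ===== LEMMAS AND PROOFS =====

-- Structural recursion computing splitOn for a single-character separator.
def pvSplit1 (d : Char) : List Char → List (List Char)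
  | [] => [[]]
  | c :: cs =>
    if c = d then [] :: pvSplit1 d cs
    else match pvSplit1 d cs with
      | [] => [[c]]   -- unreachable
      | h :: t => (c :: h) :: t

-- prepend p onto the first segment
def pvConsAll (p : List Char) : List (List Char) → List (List Char)
  | [] => [p]
  | h :: t => (p ++ h) :: t

theorem pvSplit1_ne_nil (d : Char) (l : List Char) : pvSplit1 d l ≠ [] := by
  cases l with
  | nil => simp [pvSplit1]
  | cons c cs =>
    simp only [pvSplit1]
    split
    · simp
    · split <;> simp

theorem pvGo_eq (d : Char) (fuel : Nat) (l cur : List Char) (acc : List (List Char))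
    (h : l.length ≤ fuel) :
    PySem.Chars.splitOn.go [d] fuel l cur acc
      = acc.reverse ++ pvConsAll cur.reverse (pvSplit1 d l) := by
  induction fuel generalizing l cur acc with
  | zero =>
    have hl : l = [] := List.eq_nil_of_length_eq_zero (Nat.le_zero.mp h)
    subst hl
    simp [PySem.Chars.splitOn.go, pvSplit1, pvConsAll]
  | succ fuel ih =>
    cases l with
    | nil => simp [PySem.Chars.splitOn.go, pvSplit1, pvConsAll]
    | cons c rest =>
      have hrest : rest.length ≤ fuel := by simpa using Nat.le_of_succ_le_succ (by simpa using h)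
      have hpre : ([d].isPrefixOf (c :: rest)) = (d == c) := by
        simp [List.isPrefixOf]
      by_cases hc : c = d
      · subst hc
        rw [PySem.Chars.splitOn.go]
        simp only [hpre, beq_self_eq_true, if_true, List.length_cons, List.length_nil,
          Nat.zero_add, List.drop_succ_cons, List.drop_zero]
        rw [ih rest [] (cur.reverse :: acc) hrest]
        rcases hS : pvSplit1 c rest with _ | ⟨sh, st⟩
        · exact absurd hS (pvSplit1_ne_nil c rest)
        · simp [pvSplit1, pvConsAll, hS]
      · rw [PySem.Chars.splitOn.go]
        have hdc : (d == c) = false := by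
          simp only [beq_eq_false_iff_ne]; exact fun e => hc e.symm
        simp only [hpre, hdc, Bool.false_eq_true, if_false]
        rw [ih rest (c :: cur) acc hrest]
        rcases hS : pvSplit1 d rest with _ | ⟨sh, st⟩
        · exact absurd hS (pvSplit1_ne_nil d rest)
        · simp [pvSplit1, pvConsAll, hS, hc]

theorem pvSplitOn_single (d : Char) (l : List Char) :
    PySem.Chars.splitOn l [d] = pvSplit1 d l := by
  rw [PySem.Chars.splitOn, pvGo_eq d (l.length + 1) l [] [] (Nat.le_succ _)]
  rcases hS : pvSplit1 d l with _ | ⟨h, t⟩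
  · exact absurd hS (pvSplit1_ne_nil d l)
  · simp [pvConsAll]

theorem pvJoin_consAll (sep p h : List Char) (t : List (List Char)) :
    PySem.Chars.join sep ((p ++ h) :: t) = p ++ PySem.Chars.join sep (h :: t) := by
  cases t with
  | nil => simp [PySem.Chars.join, List.intercalate]
  | cons th tt =>
    simp [PySem.Chars.join, List.intercalate, List.intersperse]

theorem pvJoin_nil_cons (sep h : List Char) (t : List (List Char)) :
    PySem.Chars.join sep ([] :: h :: t) = sep ++ PySem.Chars.join sep (h :: t) := by
  simp [PySem.Chars.join, List.intercalate, List.intersperse]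

theorem pvFoldl_eq (alpha : List Char) (cs : List Char) (acc : List Char) :
    cs.foldl
      (fun result c =>
        if c = ' ' then result ++ pvSpaceMarker
        else if PySem.Chars.isIn [c] alpha then result ++ [c]
        else result) acc
    = acc ++ PySem.Chars.join pvSpaceMarker
        ((pvSplit1 ' ' cs).map (fun seg => seg.filter (fun c => PySem.Chars.isIn [c] alpha))) := by
  induction cs generalizing acc with
  | nil => simp [pvSplit1, PySem.Chars.join, List.intercalate]
  | cons c rest ih =>
    rcases hS : pvSplit1 ' ' rest with _ | ⟨sh, st⟩
    · exact absurd hS (pvSplit1_ne_nil ' ' rest)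
    · by_cases hc : c = ' '
      · subst hc
        rw [List.foldl_cons, if_pos rfl, ih, hS]
        simp only [pvSplit1, ite_true, hS, List.map_cons, List.filter_nil]
        rw [pvJoin_nil_cons, ← List.append_assoc]
      · rw [List.foldl_cons, if_neg hc]
        simp only [pvSplit1, if_neg hc, hS, List.map_cons]
        by_cases hin : PySem.Chars.isIn [c] alpha = true
        · rw [if_pos hin, ih, hS, List.map_cons]
          have hf : (c :: sh).filter (fun c => PySem.Chars.isIn [c] alpha)
              = [c] ++ sh.filter (fun c => PySem.Chars.isIn [c] alpha) := by
            simp [hin]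
          rw [hf, pvJoin_consAll, ← List.append_assoc]
        · rw [if_neg hin, ih, hS, List.map_cons]
          have hf : (c :: sh).filter (fun c => PySem.Chars.isIn [c] alpha)
              = sh.filter (fun c => PySem.Chars.isIn [c] alpha) := by
            simp [hin]
          rw [hf]

-- ===== VERDICT (by name: the statement is the Claim_ definition above) =====
theorem filter_input_spec : Claim_equal_filter_input := by
  intro text alphabet _
  unfold Spec_filter_input filter_input filter_input_alt
  simp only [pvSplitOn_single]
  rw [pvFoldl_eq]
  simp
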